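-- pv_equiv track=rewrite | github.com/tomdif/cct-training | src/model/cct_attention.py | assign_tokens_to_steps
-- ===== SOURCE A (Python) =====
-- def assign_tokens_to_steps(
--     seq_len: int,
--     boundary_positions: list[int],
-- ) -> list[int]:
--     """Assign each token position to its step index.
--
--     Args:
--         seq_len: Total sequence length (excluding prepended summaries).
--         boundary_positions: Indices of STEP tokens in the sequence.
--
--     Returns:
--         List of length seq_len where element i is the step index for token i.
--         STEP tokens belong to the step they terminate.
--     """
--     boundary_set = set(boundary_positions)
--     step_of = []
--     current_step = 0
--     for pos in range(seq_len):
--         step_of.append(current_step)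
--         if pos in boundary_set:
--             current_step += 1
--     return step_of
-- ===== SOURCE B (Python) =====
-- def assign_tokens_to_steps(
--     seq_len: int,
--     boundary_positions: list[int],
-- ) -> list[int]:
--     """Assign each token position to its step index (segment-filling version)."""
--     boundaries = sorted(set(b for b in boundary_positions if 0 <= b < seq_len))
--     step_of = []
--     step = 0
--     prev = 0
--     for b in boundaries:
--         step_of.extend([step] * (b + 1 - prev))
--         prev = b + 1
--         step += 1
--     step_of.extend([step] * (seq_len - prev))
--     return step_of
-- ===== Notes on version B (the rewrite author's own statement) =====
-- stated objective: alternative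
-- what changed: Instead of testing set membership at every position of range(seq_len), B sorts the distinct in-range boundaries and fills the output in contiguous constant segments, one extend per step.
import Mathlib
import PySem

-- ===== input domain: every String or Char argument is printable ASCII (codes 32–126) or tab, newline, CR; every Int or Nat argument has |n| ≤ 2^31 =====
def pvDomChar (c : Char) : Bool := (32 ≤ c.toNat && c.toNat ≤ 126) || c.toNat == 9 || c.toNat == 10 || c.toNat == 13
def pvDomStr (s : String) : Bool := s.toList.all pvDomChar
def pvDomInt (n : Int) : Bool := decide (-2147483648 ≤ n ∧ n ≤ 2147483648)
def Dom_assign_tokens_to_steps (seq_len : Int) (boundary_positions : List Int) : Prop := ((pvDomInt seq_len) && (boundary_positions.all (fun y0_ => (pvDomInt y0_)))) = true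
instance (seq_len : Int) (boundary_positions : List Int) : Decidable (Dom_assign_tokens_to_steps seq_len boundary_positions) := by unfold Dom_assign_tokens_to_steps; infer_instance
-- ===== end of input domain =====

-- B fills the output in contiguous constant segments from the sorted distinct in-range
-- boundaries instead of testing set membership at every position; same values, alternative algorithm.

-- ===== PORT A =====
def assign_tokens_to_steps (seq_len : Int) (boundary_positions : List Int) : List Int :=
  let boundary_set : PySem.Set Int := PySem.Set.ofList boundary_positions
  ((PySem.List.pyRange 0 seq_len 1).foldl
    (fun (st : List Int × Int) pos =>
      (st.1 ++ [st.2], if PySem.Set.contains boundary_set pos then st.2 + 1 else st.2))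
    ([], 0)).1

-- ===== PORT B =====
def assign_tokens_to_steps_alt (seq_len : Int) (boundary_positions : List Int) : List Int :=
  let boundaries := PySem.List.sorted
    (PySem.Set.ofList (boundary_positions.filter (fun b => decide (0 ≤ b) && decide (b < seq_len))))
    (fun x => x) false
  let r := boundaries.foldl
    (fun (st : List Int × Int × Int) b =>
      (st.1 ++ List.replicate (b + 1 - st.2.2).toNat st.2.1, st.2.1 + 1, b + 1))
    ([], 0, 0)
  r.1 ++ List.replicate (seq_len - r.2.2).toNat r.2.1

-- ===== PRECONDITION & SPEC =====
def Spec_assign_tokens_to_steps (seq_len : Int) (boundary_positions : List Int) (out : List Int) : Prop := out = assign_tokens_to_steps_alt seq_len boundary_positions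
instance (seq_len : Int) (boundary_positions : List Int) (out : List Int) : Decidable (Spec_assign_tokens_to_steps seq_len boundary_positions out) := by unfold Spec_assign_tokens_to_steps; infer_instance

-- ===== CLAIM (what is proved, stated in full; the proofs are below) =====
def Claim_equal_assign_tokens_to_steps : Prop := ∀ (seq_len : Int) (boundary_positions : List Int), Dom_assign_tokens_to_steps seq_len boundary_positions → Spec_assign_tokens_to_steps seq_len boundary_positions (assign_tokens_to_steps seq_len boundary_positions)

-- ===== LEMMAS AND PROOFS =====

-- the per-position scan A performs, as a function of the remaining positions
def scanA (S : PySem.Set Int) : Int → List Int → List Int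
  | _, [] => []
  | c, p :: ps => c :: scanA S (if PySem.Set.contains S p then c + 1 else c) ps

-- the segment filling B performs, as a function of the remaining boundaries
def fillB (n : Int) : Int → Int → List Int → List Int
  | step, prev, [] => List.replicate (n - prev).toNat step
  | step, prev, b :: bs => List.replicate (b + 1 - prev).toNat step ++ fillB n (step + 1) (b + 1) bs

theorem foldA_eq_scanA (S : PySem.Set Int) (L : List Int) :
    ∀ (acc : List Int) (c : Int),
    (L.foldl (fun (st : List Int × Int) pos =>
        (st.1 ++ [st.2], if PySem.Set.contains S pos then st.2 + 1 else st.2)) (acc, c)).1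
      = acc ++ scanA S c L := by
  induction L with
  | nil => intro acc c; simp [scanA]
  | cons p ps ih =>
      intro acc c
      simp only [List.foldl_cons, scanA]
      rw [ih]
      simp

theorem foldB_eq_fillB (n : Int) (bs : List Int) :
    ∀ (acc : List Int) (step prev : Int),
    (bs.foldl (fun (st : List Int × Int × Int) b =>
        (st.1 ++ List.replicate (b + 1 - st.2.2).toNat st.2.1, st.2.1 + 1, b + 1)) (acc, step, prev)).1
      ++ List.replicate
          (n - (bs.foldl (fun (st : List Int × Int × Int) b =>
            (st.1 ++ List.replicate (b + 1 - st.2.2).toNat st.2.1, st.2.1 + 1, b + 1)) (acc, step, prev)).2.2).toNat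
          (bs.foldl (fun (st : List Int × Int × Int) b =>
            (st.1 ++ List.replicate (b + 1 - st.2.2).toNat st.2.1, st.2.1 + 1, b + 1)) (acc, step, prev)).2.1
      = acc ++ fillB n step prev bs := by
  induction bs with
  | nil => intro acc step prev; simp [fillB]
  | cons b bs ih =>
      intro acc step prev
      simp only [List.foldl_cons, fillB]
      rw [ih]
      simp

theorem scanA_no_mem (S : PySem.Set Int) (L : List Int) :
    ∀ (c : Int), (∀ p ∈ L, p ∉ S) → scanA S c L = List.replicate L.length c := by
  induction L with
  | nil => intro c _; simp [scanA]
  | cons p ps ih =>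
      intro c h
      have hp : p ∉ S := h p (by simp)
      simp only [scanA, List.length_cons]
      rw [if_neg (by simpa [PySem.Set.contains_iff] using hp)]
      rw [ih c (fun q hq => h q (by simp [hq]))]
      simp [List.replicate_succ]

theorem scanA_append_no_mem (S : PySem.Set Int) (L1 L2 : List Int) (c : Int)
    (h : ∀ p ∈ L1, p ∉ S) :
    scanA S c (L1 ++ L2) = List.replicate L1.length c ++ scanA S c L2 := by
  induction L1 generalizing c with
  | nil => simp
  | cons p ps ih =>
      have hp : p ∉ S := h p (by simp)
      simp only [List.cons_append, scanA, List.length_cons]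
      rw [if_neg (by simpa [PySem.Set.contains_iff] using hp)]
      rw [ih c (fun q hq => h q (by simp [hq]))]
      simp [List.replicate_succ]

theorem scanA_eq_fillB (S : PySem.Set Int) (n : Int) (bs : List Int) :
    ∀ (prev c : Int), bs.Pairwise (· < ·) →
    (∀ x, x ∈ bs ↔ (x ∈ S ∧ prev ≤ x ∧ x < n)) →
    scanA S c (PySem.List.pyRange prev n 1) = fillB n c prev bs := by
  induction bs with
  | nil =>
      intro prev c _ hmem
      rw [scanA_no_mem S _ c (by
        intro p hp hpS
        rw [PySem.List.mem_pyRange_one] at hp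
        exact (List.not_mem_nil (a := p)).elim (((hmem p).2 ⟨hpS, hp.1, hp.2⟩)))]
      simp [fillB, PySem.List.length_pyRange_one]
  | cons b bs ih =>
      intro prev c hpw hmem
      have hb := (hmem b).1 (by simp)
      obtain ⟨hbS, hb1, hb2⟩ := hb
      have hgt : ∀ x ∈ bs, b < x := by
        intro x hx; exact (List.pairwise_cons.1 hpw).1 x hx
      rw [PySem.List.pyRange_one_append prev b n hb1 (le_of_lt hb2)]
      rw [scanA_append_no_mem S _ _ c (by
        intro p hp hpS
        rw [PySem.List.mem_pyRange_one] at hp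
        have : p ∈ b :: bs := (hmem p).2 ⟨hpS, hp.1, lt_trans hp.2 hb2⟩
        rcases List.mem_cons.1 this with h | h
        · omega
        · have := hgt p h; omega)]
      rw [PySem.List.pyRange_one_cons hb2]
      simp only [scanA]
      rw [if_pos (by simpa [PySem.Set.contains_iff] using hbS)]
      rw [ih (b + 1) (c + 1) (List.pairwise_cons.1 hpw).2 (by
        intro x
        constructor
        · intro hx
          have hx' := (hmem x).1 (by simp [hx])
          have := hgt x hx
          exact ⟨hx'.1, by omega, hx'.2.2⟩
        · intro ⟨hxS, hx1, hx2⟩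
          have : x ∈ b :: bs := (hmem x).2 ⟨hxS, by omega, hx2⟩
          rcases List.mem_cons.1 this with h | h
          · omega
          · exact h)]
      simp only [fillB, PySem.List.length_pyRange_one]
      have hk : (b + 1 - prev).toNat = (b - prev).toNat + 1 := by omega
      rw [hk, List.replicate_succ' , List.append_assoc]
      simp

-- ===== VERDICT (by name: the statement is the Claim_ definition above) =====
theorem assign_tokens_to_steps_spec : Claim_equal_assign_tokens_to_steps := by
  intro n bp _
  unfold Spec_assign_tokens_to_steps assign_tokens_to_steps assign_tokens_to_steps_alt
  simp only []
  rw [foldA_eq_scanA, foldB_eq_fillB]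
  simp only [List.nil_append]
  rw [scanA_eq_fillB (PySem.Set.ofList bp) n
    (PySem.List.sorted
      (PySem.Set.ofList (bp.filter (fun b => decide (0 ≤ b) && decide (b < n))))
      (fun x => x) false) 0 0
    (PySem.List.sorted_ofList_pairwise_lt _)
    (by
      intro x
      rw [PySem.List.mem_sorted, PySem.Set.mem_ofList, List.mem_filter]
      simp [PySem.Set.mem_ofList])]
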